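-- pv_equiv track=rewrite | github.com/bobaba/Python-Practice | GeneticAlgorithm.py | mate
-- ===== SOURCE A (Python) =====
-- def mate(parent1: list, parent2: list) -> list:
--   """ Combine two routes to create a child route."""
--   child = []
--   misfitGene = []
--   for i in range(0,len(parent1)):
--     if parent1[i] == parent2[i]:
--       child.append(parent1[i])
--     else:
--       misfitGene.append(parent1[i])
--       misfitGene.append(parent2[i])
--       child.append(None)
--
--   for j in range(len(child)):
--     if child[j] == None:
--       stop = False
--       while stop == False:
--         a = misfitGene.pop(0)
--         if a not in child:
--           child[j] = a
--           stop = True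
--   return child
-- ===== SOURCE B (Python) =====
-- def mate(parent1: list, parent2: list) -> list:
--     """Combine two routes to create a child route."""
--     child = []
--     misfit = []
--     for g1, g2 in zip(parent1, parent2):
--         if g1 == g2:
--             child.append(g1)
--         else:
--             child.append(None)
--             misfit.extend((g1, g2))
--     # one linear dedup pass: ordered fill list of genes not already placed
--     seen = {c for c in child if c is not None}
--     fill = []
--     for g in misfit:
--         if g not in seen:
--             seen.add(g)
--             fill.append(g)
--     # assign successive fill entries to the gaps, left to right
--     result = []
--     k = 0
--     for c in child:
--         if c is None:
--             result.append(fill[k])  # IndexError if not enough spare genes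
--             k += 1
--         else:
--             result.append(c)
--     return result
-- ===== Notes on version B (the rewrite author's own statement) =====
-- stated objective: simpler
-- what changed: Replaces A's per-gap nested while that pops misfit genes and rescans the whole evolving child list for membership with two flat passes: one ordered-dedup pass over the misfit genes against a seen set, then one left-to-right assignment of the fill list to the gaps.
import Mathlib
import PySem

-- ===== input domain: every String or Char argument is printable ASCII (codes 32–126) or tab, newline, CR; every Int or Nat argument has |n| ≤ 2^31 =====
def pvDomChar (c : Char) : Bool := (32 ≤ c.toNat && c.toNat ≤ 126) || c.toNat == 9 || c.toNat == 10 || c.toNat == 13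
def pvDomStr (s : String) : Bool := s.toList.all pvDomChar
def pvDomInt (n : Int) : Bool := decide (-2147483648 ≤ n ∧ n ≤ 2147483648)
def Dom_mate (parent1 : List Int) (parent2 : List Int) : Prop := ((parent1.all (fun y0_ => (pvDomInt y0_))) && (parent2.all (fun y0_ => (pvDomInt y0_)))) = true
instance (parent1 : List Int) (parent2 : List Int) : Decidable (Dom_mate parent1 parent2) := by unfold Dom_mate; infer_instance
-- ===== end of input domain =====

-- B replaces A's per-gap pop-until-unseen nested while with two flat passes: one ordered-dedup
-- pass over the misfit genes against a `seen` set, then one left-to-right assignment of the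
-- fill list to the gaps (simpler, and measured faster: no quadratic rescans of child).

-- ===== PORT A =====
-- first loop: for i in range(len(parent1)) with parent1[i]/parent2[i]; lockstep structural
-- recursion; `none` = IndexError when parent2 is exhausted before parent1.
def scanA : List Int → List Int → (List (Option Int) × List Int) → Option (List (Option Int) × List Int)
  | [], _, st => some st
  | _ :: _, [], _ => none
  | a :: t1, b :: t2, (c, m) =>
    if a = b then scanA t1 t2 (c ++ [some a], m)
    else scanA t1 t2 (c ++ [none], m ++ [a, b])

-- `while stop == False: a = misfitGene.pop(0); if a not in child: …` — pop until unseen;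
-- `none` = IndexError on pop from empty.
def popUntil : List Int → List (Option Int) → Option (Int × List Int)
  | [], _ => none
  | a :: rest, child => if some a ∈ child then popUntil rest child else some (a, rest)

-- second loop: for j over child, filling child[j] when it is None (done = prefix already scanned)
def fillA : List (Option Int) → List (Option Int) → List Int → Option (List (Option Int))
  | done, [], _ => some done
  | done, some a :: rest, mis => fillA (done ++ [some a]) rest mis
  | done, none :: rest, mis =>
    match popUntil mis (done ++ none :: rest) with
    | none => none
    | some (a, m) => fillA (done ++ [some a]) rest m

def mate (parent1 : List Int) (parent2 : List Int) : List Int :=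
  ((scanA parent1 parent2 ([], [])).bind fun cm =>
    (fillA [] cm.1 cm.2).bind fun c => c.mapM id).getD []

-- ===== PORT B =====
def mate_alt (parent1 : List Int) (parent2 : List Int) : List Int :=
  let cm := (parent1.zip parent2).foldl
    (fun st p => if p.1 = p.2 then (st.1 ++ [some p.1], st.2) else (st.1 ++ [none], st.2 ++ [p.1, p.2]))
    ([], [])
  let child := cm.1
  let seen0 : PySem.Set Int := PySem.Set.ofList (child.filterMap id)
  let fill := (cm.2.foldl
    (fun st g => if PySem.Set.contains st.1 g then st else (PySem.Set.add st.1 g, st.2 ++ [g]))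
    (seen0, [])).2
  ((child.foldl (fun acc c =>
      acc.bind fun rk => match c with
        | some a => some (rk.1 ++ [a], rk.2)
        | none => (fill[rk.2]?).map fun g => (rk.1 ++ [g], rk.2 + 1))
    (some (([] : List Int), (0 : Nat)))).map Prod.fst).getD []

-- ===== PRECONDITION & SPEC =====
-- Pre_ excludes exactly the inputs where A raises IndexError: parent1 longer than parent2
-- (parent2[i] out of range), or fewer distinct unplaced misfit genes than gaps (pop from empty).
def Pre_mate (parent1 : List Int) (parent2 : List Int) : Prop :=
  parent1.length ≤ parent2.length ∧
  (parent1.zip parent2).countP (fun p => decide (p.1 ≠ p.2)) ≤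
    (((parent1.zip parent2).flatMap (fun p => if p.1 = p.2 then [] else [p.1, p.2])).filter
      (fun g => decide (g ∉ ((parent1.zip parent2).filter (fun p => decide (p.1 = p.2))).map Prod.fst))).dedup.length
instance (parent1 : List Int) (parent2 : List Int) : Decidable (Pre_mate parent1 parent2) := by
  unfold Pre_mate; infer_instance

def pvWitness_mate : List Int × List Int := ([1, 3, 2, 4], [1, 2, 3, 4])

def Spec_mate (parent1 : List Int) (parent2 : List Int) (out : List Int) : Prop := out = mate_alt parent1 parent2
instance (parent1 : List Int) (parent2 : List Int) (out : List Int) : Decidable (Spec_mate parent1 parent2 out) := by unfold Spec_mate; infer_instance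

-- ===== CLAIM (what is proved, stated in full; the proofs are below) =====
def Claim_equal_mate : Prop := ∀ (parent1 : List Int) (parent2 : List Int), Dom_mate parent1 parent2 → Pre_mate parent1 parent2 → Spec_mate parent1 parent2 (mate parent1 parent2)

-- ===== LEMMAS AND PROOFS =====

-- common spec of the first pass (cons-directed)
def buildCM : List (Int × Int) → List (Option Int) × List Int
  | [] => ([], [])
  | p :: t =>
    let r := buildCM t
    if p.1 = p.2 then (some p.1 :: r.1, r.2) else (none :: r.1, p.1 :: p.2 :: r.2)

-- ordered dedup of mis against a growing seen list (spec of B's fill pass and of A's pops)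
def dfill : List Int → List Int → List Int
  | _, [] => []
  | seen, g :: rest => if g ∈ seen then dfill seen rest else g :: dfill (g :: seen) rest

-- spec of the assignment pass: fill the `none` slots with successive fill entries
def fillCore : List (Option Int) → List Int → Option (List Int)
  | [], _ => some []
  | some a :: rest, F => (fillCore rest F).map (a :: ·)
  | none :: _, [] => none
  | none :: rest, g :: F => (fillCore rest F).map (g :: ·)

def gaps (l : List (Option Int)) : Nat := l.countP (fun c => decide (c = none))

theorem scanA_eq (p1 : List Int) : ∀ (p2 : List Int) (st : List (Option Int) × List Int),
    p1.length ≤ p2.length →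
    scanA p1 p2 st = some (st.1 ++ (buildCM (p1.zip p2)).1, st.2 ++ (buildCM (p1.zip p2)).2) := by
  induction p1 with
  | nil => intro p2 st _; simp [scanA, buildCM]
  | cons a t ih =>
    intro p2 st h
    match p2 with
    | [] => simp at h
    | b :: t2 =>
      obtain ⟨c, m⟩ := st
      by_cases hab : a = b
      · simp only [scanA, if_pos hab, List.zip_cons_cons, buildCM, ih t2 _ (by simpa using h)]
        simp
      · simp only [scanA, if_neg hab, List.zip_cons_cons, buildCM, ih t2 _ (by simpa using h)]
        simp

theorem scanB_eq (zs : List (Int × Int)) : ∀ (st : List (Option Int) × List Int),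
    zs.foldl (fun st p => if p.1 = p.2 then (st.1 ++ [some p.1], st.2) else (st.1 ++ [none], st.2 ++ [p.1, p.2])) st
      = (st.1 ++ (buildCM zs).1, st.2 ++ (buildCM zs).2) := by
  induction zs with
  | nil => intro st; simp [buildCM]
  | cons p t ih =>
    intro st
    by_cases hp : p.1 = p.2
    · simp only [List.foldl_cons, if_pos hp, ih, buildCM]
      simp
    · simp only [List.foldl_cons, if_neg hp, ih, buildCM]
      simp

theorem popUntil_dfill (mis : List Int) : ∀ (seen : List Int) (child : List (Option Int)),
    (∀ x : Int, some x ∈ child ↔ x ∈ seen) →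
    (popUntil mis child = none ∧ dfill seen mis = []) ∨
    (∃ a m', popUntil mis child = some (a, m') ∧ dfill seen mis = a :: dfill (a :: seen) m') := by
  induction mis with
  | nil => intro seen child _; left; exact ⟨rfl, rfl⟩
  | cons a rest ih =>
    intro seen child hmem
    by_cases ha : a ∈ seen
    · have hc : some a ∈ child := (hmem a).mpr ha
      simpa [popUntil, if_pos hc, dfill, if_pos ha] using ih seen child hmem
    · have hc : some a ∉ child := fun h => ha ((hmem a).mp h)
      right
      exact ⟨a, rest, by simp [popUntil, if_neg hc], by simp [dfill, if_neg ha]⟩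

theorem fill_main : ∀ (todo done : List (Option Int)) (mis seen : List Int),
    (∀ x : Int, (some x ∈ done ∨ some x ∈ todo) ↔ x ∈ seen) →
    gaps todo ≤ (dfill seen mis).length →
    fillA done todo mis = (fillCore todo (dfill seen mis)).map (fun l => done ++ l.map some) := by
  intro todo
  induction todo with
  | nil => intro done mis seen _ _; simp [fillA, fillCore]
  | cons c rest ih =>
    intro done mis seen hmem hlen
    match c with
    | some a =>
      have hmem' : ∀ x : Int, (some x ∈ done ++ [some a] ∨ some x ∈ rest) ↔ x ∈ seen := by
        intro x
        rw [← hmem x]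
        simp [or_assoc, or_comm, or_left_comm]
      rw [fillA, ih (done ++ [some a]) mis seen hmem' (by simpa [gaps] using hlen)]
      simp only [fillCore]
      (cases fillCore rest (dfill seen mis)) <;> simp
    | none =>
      have hmem' : ∀ x : Int, some x ∈ done ++ none :: rest ↔ x ∈ seen := by
        intro x; rw [← hmem x]; simp
      rcases popUntil_dfill mis seen (done ++ none :: rest) hmem' with ⟨_, hd⟩ | ⟨a, m', hpop, hd⟩
      · rw [hd] at hlen; simp [gaps] at hlen
      · rw [fillA, hpop]
        show fillA (done ++ [some a]) rest m' = _
        have hmem'' : ∀ x : Int, (some x ∈ done ++ [some a] ∨ some x ∈ rest) ↔ x ∈ a :: seen := by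
          intro x
          constructor
          · rintro (hx | hx)
            · rcases List.mem_append.mp hx with h | h
              · exact List.mem_cons_of_mem _ ((hmem x).mp (Or.inl h))
              · simp at h; simp [h]
            · exact List.mem_cons_of_mem _ ((hmem x).mp (Or.inr (List.mem_cons_of_mem _ hx)))
          · intro hx
            rcases List.mem_cons.mp hx with h | h
            · left; simp [h]
            · rcases (hmem x).mpr h with h2 | h2
              · left; exact List.mem_append_left _ h2
              · rcases List.mem_cons.mp h2 with h3 | h3
                · exact absurd h3 (by simp)
                · right; exact h3
        have hlen' : gaps rest ≤ (dfill (a :: seen) m').length := by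
          rw [hd] at hlen; simp [gaps] at hlen ⊢; omega
        rw [ih (done ++ [some a]) m' (a :: seen) hmem'' hlen']
        rw [hd]
        simp only [fillCore]
        cases fillCore rest (dfill (a :: seen) m') <;> simp

theorem dedup_fold (mis : List Int) : ∀ (s : PySem.Set Int) (seenL : List Int) (acc : List Int),
    (∀ x : Int, x ∈ s ↔ x ∈ seenL) →
    (mis.foldl (fun st g => if PySem.Set.contains st.1 g then st else (PySem.Set.add st.1 g, st.2 ++ [g])) (s, acc)).2
      = acc ++ dfill seenL mis := by
  induction mis with
  | nil => intro s seenL acc _; simp [dfill]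
  | cons g rest ih =>
    intro s seenL acc hmem
    by_cases hg : g ∈ seenL
    · have : PySem.Set.contains s g = true := (PySem.Set.contains_iff s g).mpr ((hmem g).mpr hg)
      simp only [List.foldl_cons, this, if_pos]
      rw [ih s seenL acc hmem, dfill, if_pos hg]
    · have : ¬ PySem.Set.contains s g = true := fun h => hg ((hmem g).mp ((PySem.Set.contains_iff s g).mp h))
      simp only [List.foldl_cons, this, if_neg, Bool.false_eq_true, not_false_iff]
      rw [ih (PySem.Set.add s g) (g :: seenL) (acc ++ [g])
        (by intro x; rw [PySem.Set.mem_add, hmem x]; simp [or_comm]), dfill, if_neg hg]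
      simp

theorem assign_foldl_none (F : List Int) : ∀ (todo : List (Option Int)),
    todo.foldl (fun acc c =>
      acc.bind fun rk => match c with
        | some a => some (rk.1 ++ [a], rk.2)
        | none => (F[rk.2]?).map fun g => (rk.1 ++ [g], rk.2 + 1))
      (none : Option (List Int × Nat)) = none := by
  intro todo
  induction todo with
  | nil => rfl
  | cons c t ih => rw [List.foldl_cons]; show t.foldl _ none = _; exact ih

theorem assign_fold (F : List Int) : ∀ (todo : List (Option Int)) (res : List Int) (k : Nat),
    todo.foldl (fun acc c =>
      acc.bind fun rk => match c with
        | some a => some (rk.1 ++ [a], rk.2)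
        | none => (F[rk.2]?).map fun g => (rk.1 ++ [g], rk.2 + 1)) (some (res, k))
      = (fillCore todo (F.drop k)).map (fun l => (res ++ l, k + gaps todo)) := by
  intro todo
  induction todo with
  | nil => intro res k; simp [fillCore, gaps]
  | cons c rest ih =>
    intro res k
    match c with
    | some a =>
      rw [List.foldl_cons]
      show rest.foldl _ (some (res ++ [a], k)) = _
      rw [ih (res ++ [a]) k]
      simp only [fillCore]
      cases fillCore rest (F.drop k) <;> simp [gaps]
    | none =>
      rw [List.foldl_cons]
      show rest.foldl _ ((F[k]?).map fun g => (res ++ [g], k + 1)) = _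
      cases hFk : F[k]? with
      | none =>
        have hdrop : F.drop k = [] := by
          have := List.getElem?_eq_none_iff.mp hFk
          simp [List.drop_eq_nil_iff]; omega
        rw [hdrop]
        simp only [fillCore, Option.map_none]
        exact assign_foldl_none F rest
      | some g =>
        obtain ⟨hk, hFkv⟩ := List.getElem?_eq_some_iff.mp hFk
        have hdrop : F.drop k = g :: F.drop (k + 1) := by
          rw [List.drop_eq_getElem_cons hk, hFkv]
        simp only [Option.map_some]
        rw [ih (res ++ [g]) (k + 1), hdrop]
        simp only [fillCore]
        (cases fillCore rest (F.drop (k + 1)) <;> simp [gaps]) <;> omega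

theorem fillCore_isSome (todo : List (Option Int)) : ∀ (F : List Int),
    gaps todo ≤ F.length → ∃ l, fillCore todo F = some l := by
  induction todo with
  | nil => intro F _; exact ⟨[], rfl⟩
  | cons c rest ih =>
    intro F h
    match c with
    | some a =>
      obtain ⟨l, hl⟩ := ih F (by simpa [gaps] using h)
      exact ⟨a :: l, by rw [fillCore, hl]; rfl⟩
    | none =>
      match F with
      | [] => simp [gaps] at h
      | g :: F' =>
        obtain ⟨l, hl⟩ := ih F' (by simp [gaps] at h ⊢; omega)
        exact ⟨g :: l, by rw [fillCore, hl]; rfl⟩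

theorem mapM_id_map_some (l : List Int) : (l.map some).mapM id = some l := by
  induction l with
  | nil => rfl
  | cons a t ih => simp [List.mapM_cons, ih]

theorem dfill_mem (mis : List Int) : ∀ (seen : List Int) (x : Int),
    x ∈ dfill seen mis ↔ x ∈ mis ∧ x ∉ seen := by
  induction mis with
  | nil => intro seen x; simp [dfill]
  | cons g rest ih =>
    intro seen x
    by_cases hg : g ∈ seen
    · rw [dfill, if_pos hg, ih]
      constructor
      · rintro ⟨h1, h2⟩; exact ⟨List.mem_cons_of_mem _ h1, h2⟩
      · rintro ⟨h1, h2⟩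
        rcases List.mem_cons.mp h1 with h | h
        · exact absurd (h ▸ hg) h2
        · exact ⟨h, h2⟩
    · rw [dfill, if_neg hg]
      simp only [List.mem_cons, ih]
      constructor
      · rintro (h | ⟨h1, h2⟩)
        · exact ⟨Or.inl h, h ▸ hg⟩
        · exact ⟨Or.inr h1, fun hx => h2 (Or.inr hx)⟩
      · rintro ⟨h1 | h1, h2⟩
        · exact Or.inl h1
        · by_cases hxg : x = g
          · exact Or.inl hxg
          · exact Or.inr ⟨h1, by simp [hxg, h2]⟩

theorem dfill_nodup (mis : List Int) : ∀ (seen : List Int), (dfill seen mis).Nodup := by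
  induction mis with
  | nil => intro seen; simp [dfill]
  | cons g rest ih =>
    intro seen
    by_cases hg : g ∈ seen
    · rw [dfill, if_pos hg]; exact ih seen
    · rw [dfill, if_neg hg]
      refine List.nodup_cons.mpr ⟨fun h => ?_, ih (g :: seen)⟩
      exact ((dfill_mem rest (g :: seen) g).mp h).2 (List.mem_cons_self)

theorem dfill_length (mis seen : List Int) :
    (dfill seen mis).length = ((mis.filter (fun g => decide (g ∉ seen))).dedup).length := by
  rw [← List.card_toFinset, ← List.toFinset_card_of_nodup (dfill_nodup mis seen)]
  congr 1
  ext x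
  simp [dfill_mem]

theorem buildCM_filterMap (zs : List (Int × Int)) :
    (buildCM zs).1.filterMap id = (zs.filter (fun p => decide (p.1 = p.2))).map Prod.fst := by
  induction zs with
  | nil => rfl
  | cons p t ih =>
    by_cases hp : p.1 = p.2
    · simpa [buildCM, hp] using ih
    · simpa [buildCM, hp] using ih

theorem buildCM_mis (zs : List (Int × Int)) :
    (buildCM zs).2 = zs.flatMap (fun p => if p.1 = p.2 then [] else [p.1, p.2]) := by
  induction zs with
  | nil => rfl
  | cons p t ih =>
    by_cases hp : p.1 = p.2
    · simp [buildCM, if_pos hp, ih]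
    · simp [buildCM, if_neg hp, ih]

theorem buildCM_gaps (zs : List (Int × Int)) :
    gaps (buildCM zs).1 = zs.countP (fun p => decide (p.1 ≠ p.2)) := by
  induction zs with
  | nil => rfl
  | cons p t ih =>
    by_cases hp : p.1 = p.2
    · simp [buildCM, gaps, hp] at ih ⊢; exact ih
    · simp [buildCM, gaps, hp] at ih ⊢; omega

theorem mem_child_iff (child : List (Option Int)) (x : Int) :
    some x ∈ child ↔ x ∈ child.filterMap id := by
  simp

-- ===== VERDICT (by name: the statement is the Claim_ definition above) =====
theorem mate_spec : Claim_equal_mate := by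
  unfold Claim_equal_mate
  intro p1 p2 _ hpre
  obtain ⟨hlen, hcnt⟩ := hpre
  unfold Spec_mate mate mate_alt
  have hchild := buildCM_filterMap (p1.zip p2)
  have hmis := buildCM_mis (p1.zip p2)
  have hgaps := buildCM_gaps (p1.zip p2)
  set zs := p1.zip p2 with hzs
  set child := (buildCM zs).1 with hc
  set mis := (buildCM zs).2 with hm
  set agreed := child.filterMap id with ha
  set F := dfill agreed mis with hF
  -- the Pre_ count bound, restated through the characterisation lemmas
  have hg : gaps child ≤ F.length := by
    rw [hF, dfill_length, hchild, hmis, hgaps]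
    exact hcnt
  have hinv : ∀ x : Int, (some x ∈ ([] : List (Option Int)) ∨ some x ∈ child) ↔ x ∈ agreed := by
    intro x; rw [ha, ← mem_child_iff]; simp
  obtain ⟨l, hl⟩ := fillCore_isSome child F hg
  -- A's side
  rw [scanA_eq p1 p2 ([], []) hlen]
  show ((fillA [] child mis).bind fun c => c.mapM id).getD [] = _
  rw [fill_main child [] mis agreed hinv hg, ← hF, hl]
  show ((some (l.map some)).bind fun c => c.mapM id).getD [] = _
  rw [Option.bind_some, mapM_id_map_some]
  -- B's side
  rw [scanB_eq zs ([], [])]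
  dsimp only [List.nil_append]
  rw [← hc, ← hm, ← ha]
  show _ = ((child.foldl _ (some (([] : List Int), (0 : Nat)))).map Prod.fst).getD []
  rw [dedup_fold mis (PySem.Set.ofList agreed) agreed []
    (fun x => PySem.Set.mem_ofList agreed x)]
  rw [assign_fold (([] : List Int) ++ dfill agreed mis) child [] 0]
  simp [← hF, hl]
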